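-- pv_equiv track=rewrite | github.com/debruijn/adventofcode | aoc_2023/aoc_7.py | hand_value_jokers
-- ===== SOURCE A (Python) =====
-- def hand_value_jokers(hand):
--     # Same setup as above, but separate out Js from hand.
--     # With >= 3 Js, you are guaranteed 4 or 5 of a kind, so you can forget about that option for lower scores
--     # Same for 2 Js: you are guaranteed 3 of a kind, so below that we can ignore Js at all
--
--     count_Js = hand.count('J')
--     counts = [hand.count(x) for x in set(hand) if x != 'J']
--     if 5 - count_Js in counts or count_Js == 5:
--         val = 6
--     elif 4 - count_Js in counts:
--         val = 5
--     elif counts.count(2) == 2 and count_Js == 1: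
--         val = 4
--     elif 3 in counts and 2 in counts:
--         val = 4
--     elif 3 - count_Js in counts:
--         val = 3
--     elif counts.count(2) == 2:
--         val = 2
--     elif 2 - count_Js in counts:
--         val = 1
--     else:
--         val = 0
--
--     numeric = ""
--     for card in hand:
--         if card.isnumeric():
--             numeric += ('0'+str(card))
--         elif card == 'T':
--             numeric += '10'
--         elif card == 'J':
--             numeric += '01'
--         elif card == 'Q':
--             numeric +='12'
--         elif card == 'K':
--             numeric +='13'
--         elif card == 'A':
--             numeric += '14'
--         else:
--             raise ValueError(f"Unknown card {card}")
--
--     return int(str(val) + numeric)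
-- ===== SOURCE B (Python) =====
-- def _runs(s):
--     # s is sorted; return its maximal runs as (card, multiplicity) pairs
--     if not s:
--         return []
--     c = s[0]
--     n = 1
--     while n < len(s) and s[n] == c:
--         n += 1
--     return [(c, n)] + _runs(s[n:])
--
--
-- _CODE = {str(d): '0' + str(d) for d in range(10)}
-- _CODE.update({'T': '10', 'J': '01', 'Q': '12', 'K': '13', 'A': '14'})
--
--
-- def hand_value_jokers(hand):
--     # Sort the hand and scan maximal runs to get each card's multiplicity,
--     # kept as a histogram {multiplicity: number of distinct non-J cards}.
--     jokers = 0
--     hist = {}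
--     for card, n in _runs(sorted(hand)):
--         if card == 'J':
--             jokers = n
--         else:
--             hist[n] = hist.get(n, 0) + 1
--     # K = largest k in 2..5 such that some card has multiplicity k - jokers
--     # (a hand of five jokers counts as K = 5)
--     if jokers == 5:
--         K = 5
--     else:
--         K = max((k for k in (2, 3, 4, 5) if hist.get(k - jokers, 0) != 0), default=0)
--     if K >= 4:
--         val = K + 1
--     elif (hist.get(2, 0) == 2 and jokers == 1) or (hist.get(3, 0) != 0 and hist.get(2, 0) != 0):
--         val = 4
--     elif K == 3:
--         val = 3
--     elif hist.get(2, 0) == 2: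
--         val = 2
--     else:
--         val = 1 if K == 2 else 0
--     parts = [_CODE[card] for card in hand]
--     return int(str(val) + ''.join(parts))
-- ===== Notes on version B (the rewrite author's own statement) =====
-- stated objective: alternative
-- what changed: B sorts the hand and scans its maximal runs into a multiplicity histogram (instead of A's set() plus one hand.count scan per distinct card), derives the hand type from the largest joker-boosted multiplicity K with a small adjustment for full house / two pair (instead of A's eight-branch membership chain over the raw counts list), and encodes the cards through one complete code table including the digits (instead of A's per-branch string appends).
import Mathlib
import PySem

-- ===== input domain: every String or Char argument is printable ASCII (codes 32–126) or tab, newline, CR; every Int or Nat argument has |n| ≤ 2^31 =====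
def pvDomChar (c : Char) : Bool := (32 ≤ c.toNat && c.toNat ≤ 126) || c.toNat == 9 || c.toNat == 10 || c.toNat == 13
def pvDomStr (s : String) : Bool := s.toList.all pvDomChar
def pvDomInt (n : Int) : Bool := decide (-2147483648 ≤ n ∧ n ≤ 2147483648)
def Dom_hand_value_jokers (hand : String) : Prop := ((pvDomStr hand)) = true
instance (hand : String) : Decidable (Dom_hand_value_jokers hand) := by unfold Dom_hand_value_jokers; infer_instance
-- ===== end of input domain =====

-- B re-implements A by sorting the hand and scanning maximal runs into a multiplicity
-- histogram, deriving the hand type from the largest joker-boosted multiplicity, and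
-- encoding cards through one complete code table (alternative algorithm, same values).


-- ===== PORT A =====
-- Exactness notes: card.isnumeric() = Chars.isdigit on the printable-ASCII domain;
-- hand.count(c) of a single character = hand.toList.count c; the counts list built by
-- iterating set(hand) is ported through PySem.Set's first-occurrence order — it is only
-- consumed by membership tests and .count(2), which do not depend on the set's order;
-- the unknown-card ValueError branch (excluded by Pre_) leaves the accumulator unchanged,
-- and int(...) is ofChars? with getD 0, exact since the parse succeeds on an all-digit string.
def hand_value_jokers (hand : String) : Int :=
  let l := hand.toList
  let count_Js : Int := (l.count 'J' : Int)
  let counts : List Int :=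
    (List.filter (fun x => x != 'J') (PySem.Set.ofList l)).map (fun x => (l.count x : Int))
  let val : Int :=
    if (5 - count_Js) ∈ counts ∨ count_Js = 5 then 6
    else if (4 - count_Js) ∈ counts then 5
    else if counts.count 2 = 2 ∧ count_Js = 1 then 4
    else if (3 : Int) ∈ counts ∧ (2 : Int) ∈ counts then 4
    else if (3 - count_Js) ∈ counts then 3
    else if counts.count 2 = 2 then 2
    else if (2 - count_Js) ∈ counts then 1
    else 0
  let numeric : List Char := l.foldl (fun acc card =>
    if PySem.Chars.isdigit card then acc ++ ['0', card]
    else if card = 'T' then acc ++ ['1', '0']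
    else if card = 'J' then acc ++ ['0', '1']
    else if card = 'Q' then acc ++ ['1', '2']
    else if card = 'K' then acc ++ ['1', '3']
    else if card = 'A' then acc ++ ['1', '4']
    else acc) []
  (PySem.Int.ofChars? (PySem.Int.toChars val ++ numeric)).getD 0

-- ===== PORT B =====
-- _runs of Source B: the inner while loop computes the length of the maximal prefix of
-- equal cards; ported as takeWhile/drop of exactly that length (exact).
def pvRuns : List Char → List (Char × Int)
  | [] => []
  | c :: t =>
    let t1 := t.takeWhile (· == c)
    (c, 1 + (t1.length : Int)) :: pvRuns (t.drop t1.length)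
termination_by s => s.length
decreasing_by simp

-- the _CODE table of Source B ({str(d): '0'+str(d)} for the ten digits, then the faces)
def pvCode2 : PySem.Dict Char (List Char) :=
  PySem.Dict.ofList [('0', ['0','0']), ('1', ['0','1']), ('2', ['0','2']), ('3', ['0','3']),
    ('4', ['0','4']), ('5', ['0','5']), ('6', ['0','6']), ('7', ['0','7']), ('8', ['0','8']),
    ('9', ['0','9']), ('T', ['1','0']), ('J', ['0','1']), ('Q', ['1','2']), ('K', ['1','3']),
    ('A', ['1','4'])]

-- Exactness notes: sorted(hand) sorts the characters by code point = PySem.List.sorted;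
-- hist[n] = hist.get(n, 0) + 1 is Dict.insert with getD; the truthiness tests on
-- hist.get(…) are ≠ 0 in Source B already; max(gen, default=0) is PySem.List.maxD;
-- _CODE[card] raises KeyError only outside Pre_, where nothing is claimed (getD []);
-- ''.join is Chars.join []; int(...) is ofChars? with getD 0 as in port A.
def hand_value_jokers_alt (hand : String) : Int :=
  let s := PySem.List.sorted hand.toList (fun c => c)
  let r := (pvRuns s).foldl
    (fun (st : Int × PySem.Dict Int Int) p =>
      if p.1 = 'J' then (p.2, st.2)
      else (st.1, st.2.insert p.2 (st.2.getD p.2 0 + 1))) ((0 : Int), PySem.Dict.empty)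
  let jokers := r.1
  let hist := r.2
  let K : Int :=
    if jokers = 5 then 5
    else PySem.List.maxD (([2, 3, 4, 5] : List Int).filter
           (fun k => hist.getD (k - jokers) 0 != 0)) (fun v => v) 0
  let val : Int :=
    if 4 ≤ K then K + 1
    else if (hist.getD 2 0 = 2 ∧ jokers = 1) ∨ (hist.getD 3 0 ≠ 0 ∧ hist.getD 2 0 ≠ 0) then 4
    else if K = 3 then 3
    else if hist.getD 2 0 = 2 then 2
    else if K = 2 then 1
    else 0
  let parts := hand.toList.map (fun c => pvCode2.getD c [])
  (PySem.Int.ofChars? (PySem.Int.toChars val ++ PySem.Chars.join [] parts)).getD 0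

-- ===== PRECONDITION & SPEC =====
-- Pre_: every character of the hand is a card A recognises (a decimal digit or one of
-- T, J, Q, K, A); on any other character A raises ValueError.
def Pre_hand_value_jokers (hand : String) : Prop :=
  (hand.toList.all (fun c => PySem.Chars.isdigit c
      || decide (c ∈ (['T', 'J', 'Q', 'K', 'A'] : List Char)))) = true
instance (hand : String) : Decidable (Pre_hand_value_jokers hand) := by
  unfold Pre_hand_value_jokers; infer_instance

def pvWitness_hand_value_jokers : String := "AJ25T"

def Spec_hand_value_jokers (hand : String) (out : Int) : Prop := out = hand_value_jokers_alt hand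
instance (hand : String) (out : Int) : Decidable (Spec_hand_value_jokers hand out) := by
  unfold Spec_hand_value_jokers; infer_instance

-- ===== CLAIM (what is proved, stated in full; the proofs are below) =====
def Claim_equal_hand_value_jokers : Prop :=
  ∀ (hand : String), Dom_hand_value_jokers hand → Pre_hand_value_jokers hand →
    Spec_hand_value_jokers hand (hand_value_jokers hand)

-- ===== LEMMAS AND PROOFS =====

-- the per-card two-digit code, in port A's branch order
def pvCode (c : Char) : List Char :=
  if PySem.Chars.isdigit c then ['0', c]
  else if c = 'T' then ['1', '0']
  else if c = 'J' then ['0', '1']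
  else if c = 'Q' then ['1', '2']
  else if c = 'K' then ['1', '3']
  else if c = 'A' then ['1', '4']
  else []

-- a decimal digit is one of the ten digit characters
theorem pv_digit_cases (c : Char) (h : PySem.Chars.isdigit c = true) :
    c ∈ (['0','1','2','3','4','5','6','7','8','9'] : List Char) := by
  simp [PySem.Chars.isdigit, Char.le_def, UInt32.le_iff_toNat_le] at h
  have he : Char.ofNat c.toNat = c := Char.ofNat_toNat c
  have h1 : 48 ≤ c.toNat := h.1
  have h2 : c.toNat ≤ 57 := h.2
  interval_cases hn : c.toNat <;> rw [← he] <;> decide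

-- on a valid card, B's table lookup is exactly A's two-digit code
theorem pv_code_eq (c : Char)
    (h : PySem.Chars.isdigit c = true ∨ c ∈ (['T', 'J', 'Q', 'K', 'A'] : List Char)) :
    pvCode2.getD c [] = pvCode c := by
  rcases h with h | h
  · have := pv_digit_cases c h
    fin_cases this <;> decide
  · fin_cases h <;> decide

-- A's numeric-building loop is the flatMap of the per-card codes
theorem pv_numeric_eq (l : List Char) (acc : List Char) :
    l.foldl (fun acc card =>
      if PySem.Chars.isdigit card then acc ++ ['0', card]
      else if card = 'T' then acc ++ ['1', '0']
      else if card = 'J' then acc ++ ['0', '1']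
      else if card = 'Q' then acc ++ ['1', '2']
      else if card = 'K' then acc ++ ['1', '3']
      else if card = 'A' then acc ++ ['1', '4']
      else acc) acc = acc ++ l.flatMap pvCode := by
  induction l generalizing acc with
  | nil => simp
  | cons c t ih =>
    simp only [List.foldl_cons, List.flatMap_cons]
    have : (if PySem.Chars.isdigit c then acc ++ ['0', c]
      else if c = 'T' then acc ++ ['1', '0']
      else if c = 'J' then acc ++ ['0', '1']
      else if c = 'Q' then acc ++ ['1', '2']
      else if c = 'K' then acc ++ ['1', '3']
      else if c = 'A' then acc ++ ['1', '4']
      else acc) = acc ++ pvCode c := by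
      unfold pvCode; split_ifs <;> simp
    rw [this, ih, List.append_assoc]

theorem pv_join_flatten (ps : List (List Char)) : PySem.Chars.join [] ps = ps.flatten := by
  simp [PySem.Chars.join, List.intercalate]
  induction ps with
  | nil => rfl
  | cons h t ih => cases t <;> simp_all [List.intersperse]

-- pvRuns of a sorted list: distinct heads, covering the list, each paired with its count
theorem pv_drop_takeWhile (t : List Char) (p : Char → Bool) :
    t.drop (t.takeWhile p).length = t.dropWhile p := by
  induction t with
  | nil => rfl
  | cons a t ih => by_cases h : p a <;> simp [h, ih]

theorem pv_runs_spec (s : List Char) : s.Pairwise (· ≤ ·) →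
    ((pvRuns s).map Prod.fst).Nodup ∧
    (∀ c, c ∈ (pvRuns s).map Prod.fst ↔ c ∈ s) ∧
    (∀ p ∈ pvRuns s, p.2 = (s.count p.1 : Int)) := by
  induction s using pvRuns.induct with
  | case1 => simp [pvRuns]
  | case2 c t t1 ih =>
    intro hs
    have ht1 : ∀ x ∈ t1, x = c := by
      intro x hx
      simpa using List.mem_takeWhile_imp hx
    have hd : t.drop t1.length = t.dropWhile (· == c) := pv_drop_takeWhile t _
    have hsplit : t1 ++ t.drop t1.length = t := by
      rw [hd]; exact List.takeWhile_append_dropWhile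
    have hct : ∀ x ∈ t, c ≤ x := (List.pairwise_cons.mp hs).1
    have hst : t.Pairwise (· ≤ ·) := (List.pairwise_cons.mp hs).2
    have hst2 : (t.drop t1.length).Pairwise (· ≤ ·) := hst.sublist (List.drop_sublist _ _)
    have hcnot : c ∉ t.drop t1.length := by
      rw [hd]
      intro hmem
      match hh : t.dropWhile (· == c) with
      | [] => rw [hh] at hmem; exact absurd hmem (List.not_mem_nil)
      | b :: r =>
        have hb : (b == c) = false := by
          have := List.head_dropWhile_not (· == c) (l := t) (by rw [hh]; simp)
          simpa [hh] using this
        have hbne : b ≠ c := by simpa using hb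
        have hbt : b ∈ t := by
          have : b ∈ t.dropWhile (· == c) := by rw [hh]; exact List.mem_cons_self
          exact (List.dropWhile_sublist _).subset this
        have hcb : c ≤ b := hct b hbt
        rw [hh] at hmem
        rcases List.mem_cons.mp hmem with h1 | h1
        · exact hbne h1.symm
        · have hpw : (b :: r).Pairwise (· ≤ ·) := by rw [← hh, ← hd]; exact hst2
          have hbc : b ≤ c := (List.pairwise_cons.mp hpw).1 c h1
          exact hbne (le_antisymm hbc hcb)
    have hcount : (c :: t).count c = 1 + t1.length := by
      rw [List.count_cons_self, ← hsplit, List.count_append]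
      have h1 : t1.count c = t1.length := List.count_eq_length.mpr (fun b hb => (ht1 b hb).symm)
      have h2 : (t.drop t1.length).count c = 0 := List.count_eq_zero.mpr hcnot
      omega
    obtain ⟨ih1, ih2, ih3⟩ := ih hst2
    have hruns : pvRuns (c :: t) = (c, 1 + (t1.length : Int)) :: pvRuns (t.drop t1.length) := by
      simp [pvRuns]
      exact ⟨rfl, rfl⟩
    refine ⟨?_, ?_, ?_⟩
    · rw [hruns]
      simp only [List.map_cons, List.nodup_cons]
      exact ⟨fun hc => hcnot ((ih2 c).mp hc), ih1⟩
    · intro x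
      rw [hruns]
      simp only [List.map_cons, List.mem_cons, ih2 x]
      constructor
      · rintro (rfl | hx)
        · exact Or.inl rfl
        · exact Or.inr (List.mem_of_mem_drop hx)
      · intro hx
        rcases hx with rfl | hx
        · exact Or.inl rfl
        · rw [← hsplit] at hx
          rcases List.mem_append.mp hx with h1 | h1
          · exact Or.inl (ht1 x h1)
          · exact Or.inr h1
    · intro p hp
      rw [hruns] at hp
      rcases List.mem_cons.mp hp with rfl | hp
      · simp only []
        rw [hcount]
        push_cast
        ring
      · have hmem : p.1 ∈ t.drop t1.length := by
          have : p.1 ∈ (pvRuns (t.drop t1.length)).map Prod.fst := List.mem_map_of_mem hp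
          exact (ih2 p.1).mp this
        have hne : p.1 ≠ c := fun h => hcnot (h ▸ hmem)
        have hnt1 : p.1 ∉ t1 := fun h => hne (ht1 _ h)
        have : (c :: t).count p.1 = (t.drop t1.length).count p.1 := by
          rw [← hsplit]
          simp [List.count_append, Ne.symm hne, List.count_eq_zero.mpr hnt1]
        rw [this]
        exact ih3 p hp

-- the run fold with a pair state is the pair of the two component folds
theorem pv_fold_pair (rs : List (Char × Int)) (j0 : Int) (d0 : PySem.Dict Int Int) :
    rs.foldl (fun (st : Int × PySem.Dict Int Int) p =>
        if p.1 = 'J' then (p.2, st.2)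
        else (st.1, st.2.insert p.2 (st.2.getD p.2 0 + 1))) (j0, d0)
    = (rs.foldl (fun j p => if p.1 = 'J' then p.2 else j) j0,
       rs.foldl (fun d p => if p.1 = 'J' then d else d.insert p.2 (d.getD p.2 0 + 1)) d0) := by
  induction rs generalizing j0 d0 with
  | nil => rfl
  | cons p t ih => by_cases h : p.1 = 'J' <;> simp [h, ih]

-- the jokers component picks the (unique) 'J' run's multiplicity
theorem pv_fold_jokers (rs : List (Char × Int)) (v : Int)
    (h : ∀ p ∈ rs, p.1 = 'J' → p.2 = v) : ∀ j0 : Int,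
    rs.foldl (fun j p => if p.1 = 'J' then p.2 else j) j0
    = if 'J' ∈ rs.map Prod.fst then v else j0 := by
  induction rs with
  | nil => simp
  | cons p t ih =>
    intro j0
    have ht := ih (fun q hq => h q (List.mem_cons_of_mem _ hq))
    by_cases hp : p.1 = 'J'
    · simp only [List.foldl_cons, hp, if_pos, h p List.mem_cons_self hp]
      simp [hp]
      rw [ht v, ite_self]
    · simp only [List.foldl_cons, List.map_cons, List.mem_cons]
      rw [if_neg hp, ht j0]
      by_cases hm : 'J' ∈ List.map Prod.fst t <;> simp [hm]
      exact fun h' => absurd h'.symm hp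

-- the histogram component counts the non-J run multiplicities
theorem pv_fold_hist (rs : List (Char × Int)) (x : Int) : ∀ d0 : PySem.Dict Int Int,
    (rs.foldl (fun d p => if p.1 = 'J' then d else d.insert p.2 (d.getD p.2 0 + 1)) d0).getD x 0
    = d0.getD x 0 + (((rs.filter (fun p => p.1 != 'J')).map (·.2)).count x : Int) := by
  induction rs with
  | nil => simp
  | cons p t ih =>
    intro d0
    by_cases hp : p.1 = 'J'
    · simp only [List.foldl_cons, hp, if_pos, List.filter_cons]
      rw [ih d0]
      simp
    · simp only [List.foldl_cons, if_neg hp, List.filter_cons]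
      rw [ih (d0.insert p.2 (d0.getD p.2 0 + 1))]
      have hb : (p.1 != 'J') = true := by simpa using hp
      rw [hb]
      simp only [if_true, List.map_cons]
      rw [PySem.Dict.getD_insert]
      by_cases hx : x = p.2
      · subst hx
        simp [List.count_cons_self]
        ring
      · rw [if_neg hx]
        have : (List.map (fun x => x.2) (List.filter (fun p => p.1 != 'J') t)).count x
            = (p.2 :: List.map (fun x => x.2) (List.filter (fun p => p.1 != 'J') t)).count x := by
          rw [List.count_cons_of_ne (Ne.symm hx)]
        omega

-- A's conditional chain agrees with B's K-based decision, over any counts list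
theorem pv_val_eq (cs : List Int) (cJ : Int) :
    (if (5 - cJ) ∈ cs ∨ cJ = 5 then (6 : Int)
     else if (4 - cJ) ∈ cs then 5
     else if cs.count 2 = 2 ∧ cJ = 1 then 4
     else if (3 : Int) ∈ cs ∧ (2 : Int) ∈ cs then 4
     else if (3 - cJ) ∈ cs then 3
     else if cs.count 2 = 2 then 2
     else if (2 - cJ) ∈ cs then 1
     else 0)
    =
    (if 4 ≤ (if cJ = 5 then (5 : Int)
             else PySem.List.maxD (([2, 3, 4, 5] : List Int).filter
                    (fun k => ((cs.count (k - cJ) : Int)) != 0)) (fun v => v) 0) then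
       (if cJ = 5 then (5 : Int)
        else PySem.List.maxD (([2, 3, 4, 5] : List Int).filter
               (fun k => ((cs.count (k - cJ) : Int)) != 0)) (fun v => v) 0) + 1
     else if ((cs.count 2 : Int) = 2 ∧ cJ = 1) ∨
             ((cs.count 3 : Int) ≠ 0 ∧ (cs.count 2 : Int) ≠ 0) then 4
     else if (if cJ = 5 then (5 : Int)
              else PySem.List.maxD (([2, 3, 4, 5] : List Int).filter
                     (fun k => ((cs.count (k - cJ) : Int)) != 0)) (fun v => v) 0) = 3 then 3
     else if (cs.count 2 : Int) = 2 then 2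
     else if (if cJ = 5 then (5 : Int)
              else PySem.List.maxD (([2, 3, 4, 5] : List Int).filter
                     (fun k => ((cs.count (k - cJ) : Int)) != 0)) (fun v => v) 0) = 2 then 1
     else 0) := by
  have hmem : ∀ y : Int, (((cs.count y : Int)) != 0) = decide (y ∈ cs) := by
    intro y
    by_cases h : y ∈ cs
    · have hpos : 0 < cs.count y := List.count_pos_iff.mpr h
      simp only [h, decide_true, bne_iff_ne, ne_eq]
      omega
    · simp [h, List.count_eq_zero.mpr h]
  by_cases h5 : cJ = 5
  · simp [h5]
  · simp only [hmem]
    by_cases m5 : (5 - cJ) ∈ cs <;> by_cases m4 : (4 - cJ) ∈ cs <;>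
      by_cases m3 : (3 - cJ) ∈ cs <;> by_cases m2 : (2 - cJ) ∈ cs <;>
        simp [m5, m4, m3, m2, h5, PySem.List.maxD, PySem.List.max?] <;>
          split_ifs <;> (try rfl) <;> (try omega) <;> simp_all [← List.count_pos_iff] <;> omega


-- ===== VERDICT (by name: the statement is the Claim_ definition above) =====
theorem hand_value_jokers_spec : Claim_equal_hand_value_jokers := by
  intro hand _ hpre
  unfold Spec_hand_value_jokers hand_value_jokers hand_value_jokers_alt
  have hv : ∀ c ∈ hand.toList,
      PySem.Chars.isdigit c = true ∨ c ∈ (['T','J','Q','K','A'] : List Char) := by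
    intro c hc
    simpa using (List.all_eq_true.mp hpre) c hc
  set l := hand.toList with hl
  set s := PySem.List.sorted l (fun c => c) with hsdef
  have hperm : s.Perm l := PySem.List.sorted_perm l _ _
  have hpw : s.Pairwise (· ≤ ·) := PySem.List.sorted_pairwise l (fun c => c)
  obtain ⟨hnd, hmemf, hcnt⟩ := pv_runs_spec s hpw
  have hcnt' : ∀ p ∈ pvRuns s, p.1 = 'J' → p.2 = (l.count 'J' : Int) := by
    intro p hp hpj
    rw [hcnt p hp, hpj, hperm.count_eq]
  have hjok : (pvRuns s).foldl (fun j p => if p.1 = 'J' then p.2 else j) 0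
      = (l.count 'J' : Int) := by
    rw [pv_fold_jokers (pvRuns s) (l.count 'J' : Int) hcnt' 0]
    by_cases hj : 'J' ∈ l
    · rw [if_pos ((hmemf 'J').mpr (hperm.mem_iff.mpr hj))]
    · rw [if_neg (fun hx => hj (hperm.mem_iff.mp ((hmemf 'J').mp hx)))]
      rw [List.count_eq_zero.mpr hj]
      simp
  -- the histogram's entries are the counts of A's counts list
  have hns : ∀ x : Int,
      (((pvRuns s).filter (fun p => p.1 != 'J')).map (·.2)).count x
      = (((PySem.Set.ofList l).filter (fun c => c != 'J')).map
          (fun c => (l.count c : Int))).count x := by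
    intro x
    rw [List.count_eq_countP, List.count_eq_countP, List.countP_map, List.countP_map,
        List.countP_filter, List.countP_filter]
    have e1 : (pvRuns s).countP (fun p => ((· == x) ∘ (·.2)) p && (p.1 != 'J'))
        = (pvRuns s).countP (fun p => (((s.count p.1 : Int)) == x) && (p.1 != 'J')) := by
      apply List.countP_congr
      intro p hp
      simp only [Function.comp_apply, hcnt p hp]
    rw [e1]
    have e2 : (pvRuns s).countP (fun p => (((s.count p.1 : Int)) == x) && (p.1 != 'J'))
        = ((pvRuns s).map Prod.fst).countP (fun c => (((s.count c : Int)) == x) && (c != 'J')) := by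
      rw [List.countP_map]
      rfl
    rw [e2]
    have hU : ((pvRuns s).map Prod.fst).Perm (PySem.Set.ofList l) := by
      rw [List.perm_ext_iff_of_nodup hnd (PySem.Set.nodup_ofList l)]
      intro a
      rw [hmemf a, PySem.Set.mem_ofList, hperm.mem_iff]
    rw [hU.countP_eq]
    apply List.countP_congr
    intro c hc
    rw [hperm.count_eq]
    rfl
  simp only [pv_fold_pair, hjok, pv_fold_hist, PySem.Dict.getD_empty, zero_add, hns]
  rw [pv_numeric_eq l [], List.nil_append]
  have hmap : l.map (fun c => pvCode2.getD c []) = l.map pvCode :=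
    List.map_congr_left (fun c hc => pv_code_eq c (hv c hc))
  rw [hmap, pv_join_flatten, ← List.flatMap_def]
  rw [← pv_val_eq ((PySem.Set.ofList l).filter (fun c => c != 'J') |>.map
        (fun c => (l.count c : Int))) (l.count 'J' : Int)]
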